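-- pv_equiv track=rewrite | github.com/lsh23/algorithm-exercise | 다익스트라/알고스팟.py | solve
-- ===== SOURCE A (Python) =====
-- from collections import deque
--
-- dy = [0, 1, 0, -1]
--
-- dx = [1, 0, -1, 0]
--
-- def solve(n: int, m: int, miro: list[list[int]]) -> int:
--     ans: int = 10001
--     q: deque[tuple[int, int, int]] = deque()
--     visited: list[int] = [[0] * m for _ in range(n)]
--     q.append((0, 0, 0))
--     while q:
--         y, x, cnt = q.popleft()
--         if y == n - 1 and x == m - 1:
--             ans = min(cnt, ans)
--         for i in range(4):
--             ny = y + dy[i]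
--             nx = x + dx[i]
--
--             if ny >= n or ny < 0 or nx >= m or nx < 0:
--                 continue
--             if visited[ny][nx] != 0:
--                 continue
--
--             visited[ny][nx] = 1
--
--             if miro[ny][nx] == 1:
--                 q.append((ny, nx, cnt + 1))
--             else:
--                 q.appendleft((ny, nx, cnt))
--
--     return ans
-- ===== SOURCE B (Python) =====
-- def solve(n: int, m: int, miro: list[list[int]]) -> int:
--     best = 10001
--     seen: set[tuple[int, int]] = set()
--     cur: list[tuple[int, int]] = [(0, 0)]   # current layer, a stack (top at the end)
--     pending: list[tuple[int, int]] = []     # next layer, in discovery order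
--     walls = 0
--     while cur or pending:
--         if not cur:
--             cur = pending[::-1]
--             pending = []
--             walls += 1
--         y, x = cur.pop()
--         if y == n - 1 and x == m - 1:
--             best = min(best, walls)
--         fresh = [(y + a, x + b) for a, b in ((0, 1), (1, 0), (0, -1), (-1, 0))
--                  if 0 <= y + a < n and 0 <= x + b < m and (y + a, x + b) not in seen]
--         seen.update(fresh)
--         cur.extend(p for p in fresh if miro[p[0]][p[1]] != 1)
--         pending.extend(p for p in fresh if miro[p[0]][p[1]] == 1)
--     return best
-- ===== Notes on version B (the rewrite author's own statement) =====
-- stated objective: alternative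
-- what changed: Replaces A's cnt-tagged 0-1 BFS deque with per-cell visited matrix and sequential 4-direction marking by a layered search that keeps a seen SET of coordinates, computes each cell's unseen in-bounds neighbours in one batch comprehension, partitions them by wall value onto a current-layer stack / next-layer list, and tracks the layer with a single counter instead of a count in every queue entry.
import Mathlib
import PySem

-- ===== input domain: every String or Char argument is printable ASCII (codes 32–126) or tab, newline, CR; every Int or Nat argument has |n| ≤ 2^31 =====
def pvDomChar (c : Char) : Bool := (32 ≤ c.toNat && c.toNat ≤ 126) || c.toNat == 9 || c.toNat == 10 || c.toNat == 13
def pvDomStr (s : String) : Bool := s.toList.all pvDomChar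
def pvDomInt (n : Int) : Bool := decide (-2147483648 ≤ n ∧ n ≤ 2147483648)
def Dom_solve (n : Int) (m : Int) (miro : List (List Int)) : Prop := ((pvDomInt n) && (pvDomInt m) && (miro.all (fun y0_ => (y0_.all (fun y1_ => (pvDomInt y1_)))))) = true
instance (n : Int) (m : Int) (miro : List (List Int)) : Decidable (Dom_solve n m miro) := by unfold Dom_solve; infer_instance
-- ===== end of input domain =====

-- B replaces A's cnt-tagged 0-1 BFS deque and visited MATRIX by a layered search over a seen
-- SET with batch neighbour filtering (comprehensions) and a single layer counter;
-- objective: alternative (same asymptotic cost, different maintained state).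

-- ===== PORT A =====
-- module constants dy, dx
def pvDyA : List Int := [0, 1, 0, -1]
def pvDxA : List Int := [1, 0, -1, 0]

-- one iteration of A's `for i in range(4)` body; state = (deque after the pop so far, visited)
def pvStepA (n m : Int) (miro : List (List Int)) (y x cnt : Int)
    (st : List (Int × Int × Int) × List (List Int)) (i : Int) :
    List (Int × Int × Int) × List (List Int) :=
  let q := st.1
  let vis := st.2
  let ny := y + pvDyA.getD i.toNat 0
  let nx := x + pvDxA.getD i.toNat 0
  if ny ≥ n ∨ ny < 0 ∨ nx ≥ m ∨ nx < 0 then (q, vis)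
  else if (vis.getD ny.toNat []).getD nx.toNat 0 ≠ 0 then (q, vis)
  else
    -- in-range by the guard; miro access is in range on Pre_ (Python raises outside it)
    let vis' := vis.set ny.toNat ((vis.getD ny.toNat []).set nx.toNat 1)
    if (miro.getD ny.toNat []).getD nx.toNat 0 = 1 then (q ++ [(ny, nx, cnt + 1)], vis')
    else ((ny, nx, cnt) :: q, vis')

-- A's while loop; fuel bounds the number of pops (each enqueue marks a fresh cell, so
-- n*m + 1 pops suffice); popleft = head, append = ++ [·], appendleft = cons
def pvLoopA (n m : Int) (miro : List (List Int)) :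
    Nat → List (Int × Int × Int) → List (List Int) → Int → Int
  | 0, _, _, ans => ans
  | _ + 1, [], _, ans => ans
  | f + 1, (y, x, cnt) :: qrest, vis, ans =>
    let ans' := if y = n - 1 ∧ x = m - 1 then min cnt ans else ans
    let st := List.foldl (pvStepA n m miro y x cnt) (qrest, vis) (PySem.List.pyRange 0 4 1)
    pvLoopA n m miro f st.1 st.2 ans'

def solve (n : Int) (m : Int) (miro : List (List Int)) : Int :=
  pvLoopA n m miro (n.toNat * m.toNat + 1) [(0, 0, 0)]
    (List.replicate n.toNat (List.replicate m.toNat 0)) 10001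

-- ===== PORT B =====
def pvDirsB : List (Int × Int) := [(0, 1), (1, 0), (0, -1), (-1, 0)]

-- the `fresh` list comprehension: in-bounds, not-yet-seen neighbours of (y, x)
def pvFreshB (n m : Int) (seen : PySem.Set (Int × Int)) (y x : Int) : List (Int × Int) :=
  (pvDirsB.map (fun dd => (y + dd.1, x + dd.2))).filter
    (fun p => decide (0 ≤ p.1 ∧ p.1 < n ∧ 0 ≤ p.2 ∧ p.2 < m) && !(PySem.Set.contains seen p))

-- `miro[p[0]][p[1]] == 1` (indices nonnegative by construction; in range on Pre_)
def pvWallB (miro : List (List Int)) (p : Int × Int) : Bool :=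
  (miro.getD p.1.toNat []).getD p.2.toNat 0 == 1

-- body of one pop of B's loop.  B's Python `cur` is a stack popped/pushed at its right end;
-- it is modelled top-first (Lean head = Python last element), so `cur.extend(zs)` is a
-- left fold pushing with cons, and `cur = pending[::-1]` is plain `cur := pending`.
def pvPopB (n m : Int) (miro : List (List Int)) (y x walls : Int)
    (rest pending : List (Int × Int)) (seen : PySem.Set (Int × Int)) (best : Int) :
    List (Int × Int) × List (Int × Int) × PySem.Set (Int × Int) × Int :=
  let best' := if y = n - 1 ∧ x = m - 1 then min best walls else best
  let fresh := pvFreshB n m seen y x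
  let seen' := PySem.Set.update seen fresh
  let cur' := (fresh.filter (fun p => !(pvWallB miro p))).foldl (fun c p => p :: c) rest
  let pend' := pending ++ fresh.filter (pvWallB miro)
  (cur', pend', seen', best')

-- B's while loop: if cur is empty, swap in the next layer and pop in the same turn
def pvLoopB (n m : Int) (miro : List (List Int)) :
    Nat → List (Int × Int) → List (Int × Int) → PySem.Set (Int × Int) → Int → Int → Int
  | 0, _, _, _, _, best => best
  | f + 1, cur0, pending0, seen, walls, best =>
    match cur0, pending0 with
    | [], [] => best
    | [], c :: ps =>
      let st := pvPopB n m miro c.1 c.2 (walls + 1) ps [] seen best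
      pvLoopB n m miro f st.1 st.2.1 st.2.2.1 (walls + 1) st.2.2.2
    | c :: rest, pending =>
      let st := pvPopB n m miro c.1 c.2 walls rest pending seen best
      pvLoopB n m miro f st.1 st.2.1 st.2.2.1 walls st.2.2.2

def solve_alt (n : Int) (m : Int) (miro : List (List Int)) : Int :=
  pvLoopB n m miro (n.toNat * m.toNat + 1) [(0, 0)] [] PySem.Set.empty 0 10001

-- ===== PRECONDITION & SPEC =====
-- Pre_ excludes exactly the inputs on which Python A raises an IndexError: grids with
-- n,m ≥ 1 (other than the 1×1 grid, whose miro is never read) whose miro is missing one of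
-- the n×m entries the search reads; it excludes no input on which A returns.
def Pre_solve (n : Int) (m : Int) (miro : List (List Int)) : Prop :=
  n ≤ 0 ∨ m ≤ 0 ∨ (n = 1 ∧ m = 1) ∨
    (n.toNat ≤ miro.length ∧ ∀ row ∈ miro.take n.toNat, m.toNat ≤ row.length)
instance (n : Int) (m : Int) (miro : List (List Int)) : Decidable (Pre_solve n m miro) := by
  unfold Pre_solve; infer_instance

def pvWitness_solve : Int × Int × List (List Int) := (2, 2, [[0, 1], [1, 0]])

def Spec_solve (n : Int) (m : Int) (miro : List (List Int)) (out : Int) : Prop := out = solve_alt n m miro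
instance (n : Int) (m : Int) (miro : List (List Int)) (out : Int) : Decidable (Spec_solve n m miro out) := by unfold Spec_solve; infer_instance

-- ===== CLAIM (what is proved, stated in full; the proofs are below) =====
def Claim_equal_solve : Prop := ∀ (n : Int) (m : Int) (miro : List (List Int)), Dom_solve n m miro → Pre_solve n m miro → Spec_solve n m miro (solve n m miro)

-- ===== LEMMAS AND PROOFS =====

-- A's deque entries, reconstructed from B's layers: current layer tagged d, next layer d+1
def pvTag (d : Int) (l : List (Int × Int)) : List (Int × Int × Int) :=
  l.map (fun c => (c.1, c.2, d))

-- A's step re-indexed by the direction pair instead of the index into dy/dx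
def pvStepA' (n m : Int) (miro : List (List Int)) (y x cnt : Int)
    (st : List (Int × Int × Int) × List (List Int)) (dd : Int × Int) :
    List (Int × Int × Int) × List (List Int) :=
  let q := st.1
  let vis := st.2
  let ny := y + dd.1
  let nx := x + dd.2
  if ny ≥ n ∨ ny < 0 ∨ nx ≥ m ∨ nx < 0 then (q, vis)
  else if (vis.getD ny.toNat []).getD nx.toNat 0 ≠ 0 then (q, vis)
  else
    let vis' := vis.set ny.toNat ((vis.getD ny.toNat []).set nx.toNat 1)
    if (miro.getD ny.toNat []).getD nx.toNat 0 = 1 then (q ++ [(ny, nx, cnt + 1)], vis')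
    else ((ny, nx, cnt) :: q, vis')

theorem pvStepA_eq (n m : Int) (miro : List (List Int)) (y x cnt : Int)
    (st : List (Int × Int × Int) × List (List Int)) (i : Int) (dd : Int × Int)
    (hdy : pvDyA.getD i.toNat 0 = dd.1) (hdx : pvDxA.getD i.toNat 0 = dd.2) :
    pvStepA n m miro y x cnt st i = pvStepA' n m miro y x cnt st dd := by
  simp only [pvStepA, pvStepA', hdy, hdx]

theorem pvFoldA_dirs (n m : Int) (miro : List (List Int)) (y x cnt : Int)
    (st : List (Int × Int × Int) × List (List Int)) :
    List.foldl (pvStepA n m miro y x cnt) st (PySem.List.pyRange 0 4 1) =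
      List.foldl (pvStepA' n m miro y x cnt) st pvDirsB := by
  have hr : PySem.List.pyRange 0 4 1 = [0, 1, 2, 3] := by decide
  rw [hr]
  simp only [pvDirsB, List.foldl]
  rw [pvStepA_eq n m miro y x cnt st 0 (0, 1) (by decide) (by decide)]
  rw [pvStepA_eq n m miro y x cnt _ 1 (1, 0) (by decide) (by decide)]
  rw [pvStepA_eq n m miro y x cnt _ 2 (0, -1) (by decide) (by decide)]
  rw [pvStepA_eq n m miro y x cnt _ 3 (-1, 0) (by decide) (by decide)]

-- the relation between A's visited matrix and B's seen set
def pvInv (n m : Int) (vis : List (List Int)) (seen : PySem.Set (Int × Int)) : Prop :=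
  vis.length = n.toNat ∧
  (∀ i : Nat, i < vis.length → (vis.getD i []).length = m.toNat) ∧
  (∀ y x : Int, 0 ≤ y → y < n → 0 ≤ x → x < m →
    (((vis.getD y.toNat []).getD x.toNat 0 ≠ 0) ↔ PySem.Set.contains seen (y, x) = true))

theorem pvGetD_set_self {α : Type} (l : List α) (i : Nat) (a d : α) (h : i < l.length) :
    (l.set i a).getD i d = a := by
  simp [List.getD, List.getElem?_set_self h]

theorem pvGetD_set_ne {α : Type} (l : List α) (i j : Nat) (a d : α) (h : i ≠ j) :
    (l.set i a).getD j d = l.getD j d := by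
  simp [List.getD, List.getElem?_set_ne h]

theorem pvInv_init (n m : Int) :
    pvInv n m (List.replicate n.toNat (List.replicate m.toNat 0)) PySem.Set.empty := by
  refine ⟨List.length_replicate, ?_, ?_⟩
  · intro i hi
    simp only [List.length_replicate] at hi
    simp [List.getD, hi]
  · intro y x hy0 hyn hx0 hxm
    have hy : y.toNat < n.toNat := by omega
    have hx : x.toNat < m.toNat := by omega
    simp [List.getD, hy, hx, PySem.Set.empty]

theorem pvInv_mark (n m : Int) (vis : List (List Int)) (seen : PySem.Set (Int × Int))
    (ny nx : Int) (hinv : pvInv n m vis seen)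
    (h0 : 0 ≤ ny) (h1 : ny < n) (h2 : 0 ≤ nx) (h3 : nx < m) :
    pvInv n m (vis.set ny.toNat ((vis.getD ny.toNat []).set nx.toNat 1))
      (PySem.Set.add seen (ny, nx)) := by
  obtain ⟨hlen, hrow, hmem⟩ := hinv
  have hnyl : ny.toNat < vis.length := by omega
  have hrowl : (vis.getD ny.toNat []).length = m.toNat := hrow ny.toNat hnyl
  refine ⟨by simp [hlen], ?_, ?_⟩
  · intro i hi
    simp only [List.length_set] at hi
    by_cases hie : i = ny.toNat
    · rw [hie, pvGetD_set_self vis ny.toNat _ [] hnyl, List.length_set]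
      exact hrowl
    · rw [pvGetD_set_ne vis ny.toNat i _ [] (by omega)]
      exact hrow i hi
  · intro y x hy0 hyn hx0 hxm
    have hcadd : PySem.Set.contains (PySem.Set.add seen (ny, nx)) (y, x) = true ↔
        ((y, x) ∈ seen ∨ (y, x) = (ny, nx)) := by
      rw [PySem.Set.contains_iff]
      exact PySem.Set.mem_add seen (ny, nx) (y, x)
    have hcold := hmem y x hy0 hyn hx0 hxm
    rw [PySem.Set.contains_iff] at hcold
    by_cases hye : y = ny
    · subst hye
      rw [pvGetD_set_self vis y.toNat _ [] hnyl, hcadd]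
      by_cases hxe : x = nx
      · subst hxe
        rw [pvGetD_set_self _ x.toNat 1 0 (by omega)]
        simp
      · rw [pvGetD_set_ne _ nx.toNat x.toNat 1 0 (by omega), hcold]
        constructor
        · exact fun h => Or.inl h
        · rintro (h | h)
          · exact h
          · exact absurd (congrArg Prod.snd h) (by simpa using hxe)
    · rw [pvGetD_set_ne vis ny.toNat y.toNat _ [] (by omega), hcadd, hcold]
      constructor
      · exact fun h => Or.inl h
      · rintro (h | h)
        · exact h
        · exact absurd (congrArg Prod.fst h) (by simpa using hye)

-- membership in an enlarged set, at a point distinct from the added one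
theorem pvContains_add_ne (seen : PySem.Set (Int × Int)) (c p : Int × Int) (h : p ≠ c) :
    PySem.Set.contains (PySem.Set.add seen c) p = PySem.Set.contains seen p := by
  by_cases hp : p ∈ seen
  · rw [(PySem.Set.contains_iff seen p).2 hp,
      (PySem.Set.contains_iff (PySem.Set.add seen c) p).2 ((PySem.Set.mem_add seen c p).2 (Or.inl hp))]
  · have h1 : PySem.Set.contains seen p ≠ true := fun hc => hp ((PySem.Set.contains_iff seen p).1 hc)
    have h2 : PySem.Set.contains (PySem.Set.add seen c) p ≠ true := fun hc => by
      rcases (PySem.Set.mem_add seen c p).1 ((PySem.Set.contains_iff (PySem.Set.add seen c) p).1 hc) with h' | h'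
      · exact hp h'
      · exact h h'
    simp only [Bool.not_eq_true] at h1 h2
    rw [h1, h2]

-- core bisimulation of one cell's neighbour scan, generalized over the direction list
theorem pvScan_rel (n m : Int) (miro : List (List Int)) (y x d : Int) :
    ∀ (ds : List (Int × Int)) (cur nxt : List (Int × Int)) (vis : List (List Int))
      (seen : PySem.Set (Int × Int)),
      pvInv n m vis seen →
      (ds.map (fun dd => (y + dd.1, x + dd.2))).Nodup →
      (List.foldl (pvStepA' n m miro y x d) (pvTag d cur ++ pvTag (d + 1) nxt, vis) ds).1 =
        pvTag d ((((ds.map (fun dd => (y + dd.1, x + dd.2))).filter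
              (fun p => decide (0 ≤ p.1 ∧ p.1 < n ∧ 0 ≤ p.2 ∧ p.2 < m) &&
                !(PySem.Set.contains seen p))).filter
            (fun p => !(pvWallB miro p))).foldl (fun c p => p :: c) cur) ++
          pvTag (d + 1) (nxt ++ ((ds.map (fun dd => (y + dd.1, x + dd.2))).filter
              (fun p => decide (0 ≤ p.1 ∧ p.1 < n ∧ 0 ≤ p.2 ∧ p.2 < m) &&
                !(PySem.Set.contains seen p))).filter (pvWallB miro)) ∧
      pvInv n m (List.foldl (pvStepA' n m miro y x d) (pvTag d cur ++ pvTag (d + 1) nxt, vis) ds).2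
        (PySem.Set.update seen ((ds.map (fun dd => (y + dd.1, x + dd.2))).filter
          (fun p => decide (0 ≤ p.1 ∧ p.1 < n ∧ 0 ≤ p.2 ∧ p.2 < m) &&
            !(PySem.Set.contains seen p)))) := by
  intro ds
  induction ds with
  | nil =>
    intro cur nxt vis seen hinv _
    exact ⟨by simp, by simpa using hinv⟩
  | cons dd ds ih =>
    intro cur nxt vis seen hinv hnd
    simp only [List.map_cons, List.nodup_cons] at hnd
    obtain ⟨hcnot, hnd'⟩ := hnd
    simp only [List.map_cons, List.foldl_cons, List.filter_cons]
    by_cases hb : (0 ≤ y + dd.1 ∧ y + dd.1 < n ∧ 0 ≤ x + dd.2 ∧ x + dd.2 < m)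
    · by_cases hseen : PySem.Set.contains seen (y + dd.1, x + dd.2) = true
      · -- in bounds but already seen: A skips, B's comprehension drops it
        have hstep : pvStepA' n m miro y x d (pvTag d cur ++ pvTag (d + 1) nxt, vis) dd =
            (pvTag d cur ++ pvTag (d + 1) nxt, vis) := by
          simp only [pvStepA']
          rw [if_neg (by omega), if_pos ((hinv.2.2 (y + dd.1) (x + dd.2)
            (by omega) (by omega) (by omega) (by omega)).2 hseen)]
        rw [hstep]
        have hpred : (decide (0 ≤ (y + dd.1 : Int) ∧ y + dd.1 < n ∧ 0 ≤ x + dd.2 ∧ x + dd.2 < m) &&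
            !(PySem.Set.contains seen (y + dd.1, x + dd.2))) = false := by
          rw [hseen]; simp
        simp only [hpred, Bool.false_eq_true, if_false]
        exact ih cur nxt vis seen hinv hnd'
      · -- a fresh in-bounds neighbour
        have hsf : PySem.Set.contains seen (y + dd.1, x + dd.2) = false := by
          revert hseen; cases PySem.Set.contains seen (y + dd.1, x + dd.2) <;> simp
        have hvis0 : (vis.getD (y + dd.1).toNat []).getD (x + dd.2).toNat 0 = 0 := by
          by_contra hne
          exact hseen ((hinv.2.2 (y + dd.1) (x + dd.2)
            (by omega) (by omega) (by omega) (by omega)).1 hne)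
        have hinv' := pvInv_mark n m vis seen (y + dd.1) (x + dd.2) hinv
          (by omega) (by omega) (by omega) (by omega)
        have hpred : (decide (0 ≤ (y + dd.1 : Int) ∧ y + dd.1 < n ∧ 0 ≤ x + dd.2 ∧ x + dd.2 < m) &&
            !(PySem.Set.contains seen (y + dd.1, x + dd.2))) = true := by
          rw [hsf, decide_eq_true hb]; rfl
        simp only [hpred, if_true]
        have hfilt : (ds.map (fun dd => (y + dd.1, x + dd.2))).filter
              (fun p => decide (0 ≤ p.1 ∧ p.1 < n ∧ 0 ≤ p.2 ∧ p.2 < m) &&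
                !(PySem.Set.contains seen p)) =
            (ds.map (fun dd => (y + dd.1, x + dd.2))).filter
              (fun p => decide (0 ≤ p.1 ∧ p.1 < n ∧ 0 ≤ p.2 ∧ p.2 < m) &&
                !(PySem.Set.contains (PySem.Set.add seen (y + dd.1, x + dd.2)) p)) := by
          refine List.filter_congr ?_
          intro a ha
          rw [pvContains_add_ne seen (y + dd.1, x + dd.2) a (fun h => hcnot (h ▸ ha))]
        by_cases hwall : pvWallB miro (y + dd.1, x + dd.2) = true
        · -- wall: goes to the next layer on both sides
          have hstep : pvStepA' n m miro y x d (pvTag d cur ++ pvTag (d + 1) nxt, vis) dd =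
              (pvTag d cur ++ pvTag (d + 1) (nxt ++ [(y + dd.1, x + dd.2)]),
               vis.set (y + dd.1).toNat ((vis.getD (y + dd.1).toNat []).set (x + dd.2).toNat 1)) := by
            simp only [pvStepA']
            rw [if_neg (by omega), if_neg (not_ne_iff.mpr hvis0),
              if_pos (by simpa [pvWallB] using hwall)]
            simp [pvTag]
          rw [hstep]
          simp only [List.filter_cons, hwall, Bool.not_true, Bool.false_eq_true, if_false,
            if_true]
          rw [hfilt, PySem.Set.update_cons]
          have H := ih cur (nxt ++ [(y + dd.1, x + dd.2)])
            (vis.set (y + dd.1).toNat ((vis.getD (y + dd.1).toNat []).set (x + dd.2).toNat 1))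
            (PySem.Set.add seen (y + dd.1, x + dd.2)) hinv' hnd'
          rw [List.append_assoc, List.singleton_append] at H
          exact H
        · -- free cell: pushed on the current layer's stack on both sides
          have hwf : pvWallB miro (y + dd.1, x + dd.2) = false := by
            revert hwall; cases pvWallB miro (y + dd.1, x + dd.2) <;> simp
          have hstep : pvStepA' n m miro y x d (pvTag d cur ++ pvTag (d + 1) nxt, vis) dd =
              (pvTag d ((y + dd.1, x + dd.2) :: cur) ++ pvTag (d + 1) nxt,
               vis.set (y + dd.1).toNat ((vis.getD (y + dd.1).toNat []).set (x + dd.2).toNat 1)) := by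
            simp only [pvStepA']
            rw [if_neg (by omega), if_neg (not_ne_iff.mpr hvis0),
              if_neg (show (miro.getD (y + dd.1).toNat []).getD (x + dd.2).toNat 0 ≠ 1 by
                simpa [pvWallB] using hwf)]
            simp [pvTag]
          rw [hstep]
          simp only [List.filter_cons, hwf, Bool.not_false, Bool.false_eq_true, if_false,
            if_true, List.foldl_cons]
          rw [hfilt, PySem.Set.update_cons]
          exact ih ((y + dd.1, x + dd.2) :: cur) nxt
            (vis.set (y + dd.1).toNat ((vis.getD (y + dd.1).toNat []).set (x + dd.2).toNat 1))
            (PySem.Set.add seen (y + dd.1, x + dd.2)) hinv' hnd'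
    · -- out of bounds: A's guard skips, B's comprehension drops it
      have hstep : pvStepA' n m miro y x d (pvTag d cur ++ pvTag (d + 1) nxt, vis) dd =
          (pvTag d cur ++ pvTag (d + 1) nxt, vis) := by
        simp only [pvStepA']
        rw [if_pos (by omega)]
      rw [hstep]
      have hpred : (decide (0 ≤ (y + dd.1 : Int) ∧ y + dd.1 < n ∧ 0 ≤ x + dd.2 ∧ x + dd.2 < m) &&
          !(PySem.Set.contains seen (y + dd.1, x + dd.2))) = false := by
        rw [decide_eq_false hb, Bool.false_and]
      simp only [hpred, Bool.false_eq_true, if_false]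
      exact ih cur nxt vis seen hinv hnd'

-- the four neighbours of a cell are pairwise distinct
theorem pvNodup4 (y x : Int) :
    ((pvDirsB.map (fun dd => (y + dd.1, x + dd.2)))).Nodup := by
  simp [pvDirsB, List.nodup_cons, Prod.mk.injEq]

-- lockstep bisimulation of the two loops
theorem pvLoop_rel (n m : Int) (miro : List (List Int)) :
    ∀ (f : Nat) (cur pending : List (Int × Int)) (d : Int) (vis : List (List Int))
      (seen : PySem.Set (Int × Int)) (ans : Int),
      pvInv n m vis seen →
      pvLoopA n m miro f (pvTag d cur ++ pvTag (d + 1) pending) vis ans =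
        pvLoopB n m miro f cur pending seen d ans := by
  intro f
  induction f with
  | zero => intro cur pending d vis seen ans _; rfl
  | succ f ih =>
    intro cur pending d vis seen ans hinv
    cases cur with
    | cons c rest =>
      obtain ⟨cy, cx⟩ := c
      rw [show pvTag d ((cy, cx) :: rest) = (cy, cx, d) :: pvTag d rest from rfl,
        List.cons_append]
      simp only [pvLoopA, pvLoopB, pvPopB, pvFreshB]
      rw [pvFoldA_dirs]
      obtain ⟨h1, h2⟩ := pvScan_rel n m miro cy cx d pvDirsB rest pending vis seen hinv
        (pvNodup4 cy cx)
      rw [h1, min_comm d ans]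
      exact ih _ _ _ _ _ _ h2
    | nil =>
      cases pending with
      | nil => rfl
      | cons c ps =>
        obtain ⟨cy, cx⟩ := c
        rw [show pvTag d ([] : List (Int × Int)) ++ pvTag (d + 1) ((cy, cx) :: ps) =
            (cy, cx, d + 1) :: (pvTag (d + 1) ps ++ pvTag (d + 1 + 1) []) from by
          simp [pvTag]]
        simp only [pvLoopA, pvLoopB, pvPopB, pvFreshB]
        rw [pvFoldA_dirs]
        obtain ⟨h1, h2⟩ := pvScan_rel n m miro cy cx (d + 1) pvDirsB ps [] vis seen hinv
          (pvNodup4 cy cx)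
        rw [h1, min_comm (d + 1) ans]
        exact ih _ _ _ _ _ _ h2

-- ===== VERDICT (by name: the statement is the Claim_ definition above) =====
theorem solve_spec : Claim_equal_solve := by
  intro n m miro _ _
  unfold Spec_solve solve solve_alt
  have h := pvLoop_rel n m miro (n.toNat * m.toNat + 1) [(0, 0)] [] 0
    (List.replicate n.toNat (List.replicate m.toNat 0)) PySem.Set.empty 10001
    (pvInv_init n m)
  simpa [pvTag] using h
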